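-- pv_equiv track=rewrite | github.com/costa-group/gasol-optimizer | sfs_generator/gasol_optimization.py | split_by_numbers
-- ===== SOURCE A (Python) =====
-- max_bound = 22
--
-- def get_sequence(split_list):
--     i = 0
--     split = []
--     if split_list == []:
--         return split
--
--     while (i<len(split_list) and split_list[i]<max_bound):
--
--         split.append(split_list[i])
--         i+=1
--
--     for i in split:
--         split_list.pop(0)
--
--     return split
--
-- def split_by_numbers(stores):
--     s = 0
--     last = 0
--     split_list = []
--     count = 0
--     remove = 0
--
--     next_split = ""
--     while(stores!=[]):
--
--         split = get_sequence(stores)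
--         if split == []:
--             next_element = stores.pop(0)
--             split_list.append(next_element+last)
--             last= split_list[-1]
--             stores = list(map(lambda x: x-next_element,stores))
--         else:
--             split_list.append(split[-1]+last)
--             last = split_list[-1]
--             stores = list(map(lambda x: x-split[-1],stores))
--
--     return split_list
-- ===== SOURCE B (Python) =====
-- # Single pass: A's shifting of the whole tail is equivalent to tracking the
-- # threshold T = value emitted at the last boundary; each emitted value is the
-- # ORIGINAL value at the end of a maximal run of elements with x - T < 22.
-- # Note: A mutates its argument (pops its first run/element); B does not --
-- # the equivalence is about the return value only.
-- def split_by_numbers(stores):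
--     res = []
--     T = 0
--     cur = None
--     run_open = False
--     for x in stores:
--         if run_open:
--             if x - T < 22:
--                 cur = x
--                 continue
--             res.append(cur)
--             T = cur
--         if x - T >= 22:
--             res.append(x)
--             T = x
--             run_open = False
--         else:
--             cur = x
--             run_open = True
--     if run_open:
--         res.append(cur)
--     return res
-- ===== Notes on version B (the rewrite author's own statement) =====
-- stated objective: faster
-- what changed: Replaced A's repeated pop-prefix-and-rebuild-the-whole-tail-with-map loop by a single left-to-right pass that tracks the threshold T (the last emitted value) and an open run, emitting the original value at each run boundary.
import Mathlib
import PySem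

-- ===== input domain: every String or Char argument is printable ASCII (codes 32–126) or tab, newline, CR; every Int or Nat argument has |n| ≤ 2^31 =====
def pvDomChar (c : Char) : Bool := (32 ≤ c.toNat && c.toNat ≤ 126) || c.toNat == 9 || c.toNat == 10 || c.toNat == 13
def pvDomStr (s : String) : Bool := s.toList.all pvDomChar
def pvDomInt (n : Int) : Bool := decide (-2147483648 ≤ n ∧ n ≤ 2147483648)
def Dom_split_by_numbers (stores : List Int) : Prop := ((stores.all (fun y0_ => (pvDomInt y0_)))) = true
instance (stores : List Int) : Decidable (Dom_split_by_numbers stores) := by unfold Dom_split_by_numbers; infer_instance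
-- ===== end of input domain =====

-- B replaces A's pop-prefix-then-rebuild-the-whole-tail loop by a single pass that
-- tracks the last emitted value as a threshold; the equivalence is about the return
-- value only (the Python A also mutates its argument list, B does not).

-- ===== PORT A =====
-- get_sequence: collect the prefix of elements < max_bound (= 22) and pop it off;
-- Lean lists are immutable, so it returns (split, remaining list).
def getSeq (l : List Int) : List Int × List Int :=
  match l with
  | [] => ([], [])
  | x :: xs =>
    if x < 22 then
      let p := getSeq xs
      (x :: p.1, p.2)
    else ([], x :: xs)

-- cited by goA's decreasing_by: get_sequence never returns a longer remainder
theorem getSeq_snd_length : ∀ l : List Int, (getSeq l).2.length ≤ l.length := by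
  intro l
  induction l with
  | nil => simp [getSeq]
  | cons x xs ih =>
    simp only [getSeq]
    split
    · simpa using Nat.le_succ_of_le ih
    · simp

-- the while loop of split_by_numbers: split == [] pops one element, else emits
-- split[-1] + last and shifts the remainder; stores shrinks each iteration
def goA (stores : List Int) (last : Int) : List Int :=
  match stores with
  | [] => []
  | x :: xs =>
    if hs : (getSeq (x :: xs)).1 = [] then
      (x + last) :: goA (xs.map (fun y => y - x)) (x + last)
    else
      ((getSeq (x :: xs)).1.getLast hs + last) ::
        goA ((getSeq (x :: xs)).2.map (fun y => y - (getSeq (x :: xs)).1.getLast hs))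
          ((getSeq (x :: xs)).1.getLast hs + last)
termination_by stores.length
decreasing_by
  · simp
  · simp only [List.length_map]
    by_cases hx : x < 22
    · simp only [getSeq, if_pos hx]
      exact Nat.lt_succ_of_le (getSeq_snd_length xs)
    · exact absurd (by simp [getSeq, if_neg hx]) hs

def split_by_numbers (stores : List Int) : List Int := goA stores 0

-- ===== PORT B =====
-- one pass over the original list: T is the last emitted value (the threshold),
-- cur = some c means a run is open with current last element c
def goB (l : List Int) (T : Int) (cur : Option Int) : List Int :=
  match l, cur with
  | [], none => []
  | [], some c => [c]
  | x :: xs, some c =>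
    if x - T < 22 then goB xs T (some x)
    else
      c :: (if x - c ≥ 22 then x :: goB xs x none else goB xs c (some x))
  | x :: xs, none =>
    if x - T ≥ 22 then x :: goB xs x none else goB xs T (some x)

def split_by_numbers_alt (stores : List Int) : List Int := goB stores 0 none

-- ===== PRECONDITION & SPEC =====
def Spec_split_by_numbers (stores : List Int) (out : List Int) : Prop := out = split_by_numbers_alt stores
instance (stores : List Int) (out : List Int) : Decidable (Spec_split_by_numbers stores out) := by unfold Spec_split_by_numbers; infer_instance

-- ===== CLAIM (what is proved, stated in full; the proofs are below) =====
def Claim_equal_split_by_numbers : Prop := ∀ (stores : List Int), Dom_split_by_numbers stores → Spec_split_by_numbers stores (split_by_numbers stores)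

-- ===== LEMMAS AND PROOFS =====

theorem getSeq_eq (l : List Int) :
    getSeq l = (l.takeWhile (fun y => y < 22), l.dropWhile (fun y => y < 22)) := by
  induction l with
  | nil => simp [getSeq]
  | cons x xs ih =>
    by_cases hx : x < 22
    · simp [getSeq, hx, ih, List.dropWhile_cons]
    · simp [getSeq, hx]

-- shifting the whole list by T commutes with splitting at the < 22 boundary
theorem takeWhile_shift (T : Int) (l : List Int) :
    (l.map (fun y => y - T)).takeWhile (fun y => y < 22)
      = (l.takeWhile (fun y => y - T < 22)).map (fun y => y - T) := by
  induction l with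
  | nil => simp
  | cons x xs ih =>
    by_cases h : x - T < 22 <;> simp [h, ih]

theorem dropWhile_shift (T : Int) (l : List Int) :
    (l.map (fun y => y - T)).dropWhile (fun y => y < 22)
      = (l.dropWhile (fun y => y - T < 22)).map (fun y => y - T) := by
  induction l with
  | nil => simp
  | cons x xs ih =>
    by_cases h : x - T < 22 <;> simp [h, ih]

theorem map_getLast {f : Int → Int} (l : List Int) (h : l ≠ []) :
    (l.map f).getLast (by simpa using h) = f (l.getLast h) := by
  induction l with
  | nil => simp at h
  | cons x xs ih =>
    cases xs with
    | nil => simp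
    | cons y ys => simpa [List.getLast_cons] using ih (by simp)

-- closing an open run: goB with an open run emits the last element of the maximal
-- run (cur :: takeWhile) and then continues closed with that element as threshold
theorem goB_open (xs : List Int) : ∀ (T c : Int),
    goB xs T (some c) =
      (c :: xs.takeWhile (fun y => y - T < 22)).getLast (by simp) ::
        goB (xs.dropWhile (fun y => y - T < 22))
          ((c :: xs.takeWhile (fun y => y - T < 22)).getLast (by simp)) none := by
  induction xs with
  | nil => intro T c; simp [goB]
  | cons x xs ih =>
    intro T c
    by_cases hx : x - T < 22
    · rw [show goB (x :: xs) T (some c) = goB xs T (some x) by simp [goB, hx]]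
      rw [ih T x]
      have ht : (x :: xs).takeWhile (fun y => y - T < 22)
          = x :: xs.takeWhile (fun y => y - T < 22) := by simp [hx]
      have hd : (x :: xs).dropWhile (fun y => y - T < 22)
          = xs.dropWhile (fun y => y - T < 22) := by simp [List.dropWhile_cons, hx]
      rw [ht, hd]
      simp [List.getLast_cons]
    · have ht : (x :: xs).takeWhile (fun y => y - T < 22) = [] := by
        simp [hx]
      have hd : (x :: xs).dropWhile (fun y => y - T < 22) = x :: xs := by
        simp [List.dropWhile_cons, hx]
      rw [ht, hd]
      simp only [goB, if_neg hx, List.getLast_singleton]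

-- main invariant: running A on the tail shifted by T (with last = T) equals
-- running B on the original tail with threshold T and no open run
theorem goA_eq_goB (n : Nat) : ∀ (l : List Int), l.length ≤ n → ∀ (T : Int),
    goA (l.map (fun y => y - T)) T = goB l T none := by
  induction n with
  | zero =>
    intro l hl T
    have h0 : l = [] := List.eq_nil_of_length_eq_zero (Nat.le_zero.mp hl)
    subst h0; simp [goA, goB]
  | succ n ih =>
    intro l hl T
    cases l with
    | nil => simp [goA, goB]
    | cons x xs =>
      by_cases hx : x - T < 22
      · -- a run starts at x
        have ht : (x :: xs).takeWhile (fun y => y - T < 22)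
            = x :: xs.takeWhile (fun y => y - T < 22) := by simp [hx]
        have hd : (x :: xs).dropWhile (fun y => y - T < 22)
            = xs.dropWhile (fun y => y - T < 22) := by simp [List.dropWhile_cons, hx]
        have hsp1 : (getSeq ((x :: xs).map (fun y => y - T))).1
            = ((x :: xs).takeWhile (fun y => y - T < 22)).map (fun y => y - T) := by
          rw [getSeq_eq]; exact takeWhile_shift T (x :: xs)
        have hsp2 : (getSeq ((x :: xs).map (fun y => y - T))).2
            = ((x :: xs).dropWhile (fun y => y - T < 22)).map (fun y => y - T) := by
          rw [getSeq_eq]; exact dropWhile_shift T (x :: xs)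
        have hrunne : (x :: xs).takeWhile (fun y => y - T < 22) ≠ [] := by
          rw [ht]; simp
        have hne : (getSeq ((x :: xs).map (fun y => y - T))).1 ≠ [] := by
          rw [hsp1, ht]; simp
        simp only [List.map_cons] at hsp1 hsp2 hne ⊢
        rw [goA, dif_neg hne]
        simp only [hsp1, hsp2]
        rw [map_getLast _ hrunne]
        have hcomp : (((x :: xs).dropWhile (fun y => y - T < 22)).map (fun y => y - T)).map
              (fun y => y - (((x :: xs).takeWhile (fun y => y - T < 22)).getLast hrunne - T))
            = ((x :: xs).dropWhile (fun y => y - T < 22)).map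
              (fun y => y - ((x :: xs).takeWhile (fun y => y - T < 22)).getLast hrunne) := by
          rw [List.map_map]; apply List.map_congr_left
          intro a _; simp only [Function.comp_apply]; ring
        have hv : ((x :: xs).takeWhile (fun y => y - T < 22)).getLast hrunne - T + T
            = ((x :: xs).takeWhile (fun y => y - T < 22)).getLast hrunne := by ring
        rw [hcomp, hv]
        have hlen : ((x :: xs).dropWhile (fun y => y - T < 22)).length ≤ n := by
          rw [hd]
          exact le_trans (List.length_dropWhile_le _ _) (Nat.le_of_succ_le_succ hl)
        rw [ih _ hlen]
        -- B side
        have hB : goB (x :: xs) T none = goB xs T (some x) := by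
          simp [goB, hx, not_le.mpr hx]
        rw [hB, goB_open]
        have hgl2 : (x :: xs.takeWhile (fun y => y - T < 22)).getLast (by simp)
            = ((x :: xs).takeWhile (fun y => y - T < 22)).getLast hrunne := by
          congr 1 <;> rw [ht]
        rw [hgl2, hd]
      · -- x alone is at or above the threshold
        have hsp : (getSeq ((x :: xs).map (fun y => y - T))).1 = [] := by
          rw [getSeq_eq]; simp [hx]
        simp only [List.map_cons] at hsp ⊢
        rw [goA, dif_pos hsp]
        have h1 : x - T + T = x := by ring
        have h2 : (xs.map (fun y => y - T)).map (fun y => y - (x - T))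
            = xs.map (fun y => y - x) := by
          rw [List.map_map]; apply List.map_congr_left
          intro a _; simp only [Function.comp_apply]; ring
        rw [h1, h2, ih xs (Nat.le_of_succ_le_succ hl) x]
        simp [goB, hx]

-- ===== VERDICT (by name: the statement is the Claim_ definition above) =====
theorem split_by_numbers_spec : Claim_equal_split_by_numbers := by
  intro stores _
  unfold Spec_split_by_numbers split_by_numbers split_by_numbers_alt
  have h := goA_eq_goB stores.length stores le_rfl 0
  simpa using h
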